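-- pv_equiv track=rewrite | github.com/eriin10/Project-2-CSC-109 | derivation.py | rightmost_derivation
-- ===== SOURCE A (Python) =====
-- def rightmost_derivation(n, m):
--     """Return list of sentential forms in a rightmost derivation for given n, m."""
--     steps = []
--
--     # Start with the start symbol
--     current = ['S']
--     steps.append(' '.join(current))
--
--     # S → A C B
--     current = ['A', 'C', 'B']
--     steps.append(' '.join(current))
--
--     # Expand B → B bb (m-1) times using rightmost rule
--     for _ in range(m - 1):
--         current = current[:-1] + ['B', 'bb']  # replace rightmost B
--         steps.append(' '.join(current))
--
--     # Last B → bb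
--     current = current[:-1] + ['bb']
--     steps.append(' '.join(current))
--
--     # C → cc (C is now the rightmost non-terminal)
--     j = current.index('C')
--     current = current[:j] + ['cc'] + current[j + 1:]
--     steps.append(' '.join(current))
--
--     # Expand A → aa A (n-1) times using rightmost rule
--     for _ in range(n - 1):
--         j = max(i for i, symbol in enumerate(current) if symbol == 'A')  # rightmost A
--         current = current[:j] + ['aa', 'A'] + current[j + 1:]
--         steps.append(' '.join(current))
--
--     # Last A → aa
--     j = current.index('A')
--     current = current[:j] + ['aa'] + current[j + 1:]
--     steps.append(' '.join(current))
--
--     return steps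
-- ===== SOURCE B (Python) =====
-- def rightmost_derivation(n, m):
--     """Return list of sentential forms in a rightmost derivation for given n, m."""
--     tail = ['B'] * max(m - 1, 0) + ['bb']
--     steps = ['S', 'A C B']
--     for k in range(1, m):
--         steps.append(' '.join(['A', 'C'] + ['B'] * k + ['bb']))
--     steps.append(' '.join(['A', 'C'] + tail))
--     steps.append(' '.join(['A', 'cc'] + tail))
--     for k in range(1, n):
--         steps.append(' '.join(['aa'] * k + ['A', 'cc'] + tail))
--     steps.append(' '.join(['aa'] * max(n, 1) + ['cc'] + tail))
--     return steps
-- ===== Notes on version B (the rewrite author's own statement) =====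
-- stated objective: simpler
-- what changed: Dropped the mutable `current` list with its dropLast/index/rightmost-symbol rescans; each sentential form is now a string computed directly from its loop index (closed-form shape ['aa']*k + ... + ['B']*j + ['bb']), so B only appends precomputed strings.
import Mathlib
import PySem

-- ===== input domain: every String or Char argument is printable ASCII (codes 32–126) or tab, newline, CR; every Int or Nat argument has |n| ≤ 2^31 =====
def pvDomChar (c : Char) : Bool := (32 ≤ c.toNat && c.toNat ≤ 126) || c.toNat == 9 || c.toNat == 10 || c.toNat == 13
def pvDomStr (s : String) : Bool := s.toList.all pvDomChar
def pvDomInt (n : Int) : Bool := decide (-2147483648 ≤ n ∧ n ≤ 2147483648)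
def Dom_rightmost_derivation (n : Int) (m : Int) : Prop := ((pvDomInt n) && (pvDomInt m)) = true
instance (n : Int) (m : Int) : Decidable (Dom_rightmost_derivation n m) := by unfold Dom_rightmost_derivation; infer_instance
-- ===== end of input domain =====

-- B replaces A's mutated `current` list and its rightmost-symbol rescans by emitting each
-- sentential form directly from its loop index (objective: simpler).


-- ===== PORT A =====
-- body of `for _ in range(m-1)`: current = current[:-1] + ['B','bb']; steps.append(' '.join(current))
def aStep1 (st : List String × List String) : List String × List String :=
  let cur := PySem.List.slice st.1 none (some (-1)) ++ ["B", "bb"]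
  (cur, st.2 ++ [PySem.Str.join " " cur])

-- `for _ in range(m-1)` runs max(m-1,0) times; the loop variable is unused
def aLoop1 : Nat → (List String × List String) → (List String × List String)
  | 0, st => st
  | Nat.succ k, st => aLoop1 k (aStep1 st)

-- j = max(i for i, symbol in enumerate(current) if symbol == 'A'); Python's max over the
-- nonempty index list equals foldl max 0 since indices are ≥ 0 ('A' is always present here;
-- Python would raise ValueError on the empty generator)
def aRightA (cur : List String) : Int :=
  ((PySem.List.enumerate cur 0).filterMap
      (fun p => if p.2 = "A" then some p.1 else none)).foldl max 0

-- body of `for _ in range(n-1)`: current = current[:j] + ['aa','A'] + current[j+1:]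
def aStep2 (st : List String × List String) : List String × List String :=
  let j := aRightA st.1
  let cur := PySem.List.slice st.1 none (some j) ++ ["aa", "A"] ++ PySem.List.slice st.1 (some (j + 1)) none
  (cur, st.2 ++ [PySem.Str.join " " cur])

def aLoop2 : Nat → (List String × List String) → (List String × List String)
  | 0, st => st
  | Nat.succ k, st => aLoop2 k (aStep2 st)

def rightmost_derivation (n : Int) (m : Int) : List String :=
  let current0 : List String := ["S"]
  let steps0 := [PySem.Str.join " " current0]
  let current1 : List String := ["A", "C", "B"]
  let steps1 := steps0 ++ [PySem.Str.join " " current1]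
  let st2 := aLoop1 (m - 1).toNat (current1, steps1)
  -- current = current[:-1] + ['bb']
  let current3 := PySem.List.slice st2.1 none (some (-1)) ++ ["bb"]
  let steps3 := st2.2 ++ [PySem.Str.join " " current3]
  -- j = current.index('C'); 'C' is always present here (Python raises on the none branch)
  let j : Nat := (PySem.List.index? current3 "C").getD 0
  let current4 := PySem.List.slice current3 none (some (j : Int)) ++ ["cc"] ++ PySem.List.slice current3 (some ((j : Int) + 1)) none
  let steps4 := steps3 ++ [PySem.Str.join " " current4]
  let st5 := aLoop2 (n - 1).toNat (current4, steps4)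
  -- j = current.index('A'); 'A' is always present here
  let j2 : Nat := (PySem.List.index? st5.1 "A").getD 0
  let current6 := PySem.List.slice st5.1 none (some (j2 : Int)) ++ ["aa"] ++ PySem.List.slice st5.1 (some ((j2 : Int) + 1)) none
  st5.2 ++ [PySem.Str.join " " current6]

-- ===== PORT B =====
def rightmost_derivation_alt (n : Int) (m : Int) : List String :=
  let tail := List.replicate (max (m - 1) 0).toNat "B" ++ ["bb"]
  ["S", "A C B"]
    ++ (PySem.List.pyRange 1 m 1).map
        (fun k => PySem.Str.join " " (["A", "C"] ++ List.replicate k.toNat "B" ++ ["bb"]))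
    ++ [PySem.Str.join " " (["A", "C"] ++ tail)]
    ++ [PySem.Str.join " " (["A", "cc"] ++ tail)]
    ++ (PySem.List.pyRange 1 n 1).map
        (fun k => PySem.Str.join " " (List.replicate k.toNat "aa" ++ ["A", "cc"] ++ tail))
    ++ [PySem.Str.join " " (List.replicate (max n 1).toNat "aa" ++ ["cc"] ++ tail)]

-- ===== PRECONDITION & SPEC =====
def Spec_rightmost_derivation (n : Int) (m : Int) (out : List String) : Prop := out = rightmost_derivation_alt n m
instance (n : Int) (m : Int) (out : List String) : Decidable (Spec_rightmost_derivation n m out) := by unfold Spec_rightmost_derivation; infer_instance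

-- ===== CLAIM (what is proved, stated in full; the proofs are below) =====
def Claim_equal_rightmost_derivation : Prop := ∀ (n : Int) (m : Int), Dom_rightmost_derivation n m → Spec_rightmost_derivation n m (rightmost_derivation n m)

-- ===== LEMMAS AND PROOFS =====
lemma aLoop1_inv (k : Nat) : ∀ (j : Nat) (steps : List String),
    aLoop1 k (["A", "C"] ++ List.replicate j "B" ++ ["bb"], steps)
      = (["A", "C"] ++ List.replicate (j + k) "B" ++ ["bb"],
         steps ++ (List.range k).map
           (fun i => PySem.Str.join " " (["A", "C"] ++ List.replicate (j + i + 1) "B" ++ ["bb"]))) := by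
  induction k with
  | zero => intro j steps; simp [aLoop1]
  | succ k ih =>
    intro j steps
    have hform : PySem.List.slice (["A", "C"] ++ List.replicate j "B" ++ ["bb"]) none (some (-1)) ++ ["B", "bb"]
        = ["A", "C"] ++ List.replicate (j + 1) "B" ++ ["bb"] := by
      rw [PySem.List.slice_to_neg_one, List.dropLast_concat]
      simp [List.replicate_succ']
    show aLoop1 k (aStep1 _) = _
    rw [show aStep1 (["A", "C"] ++ List.replicate j "B" ++ ["bb"], steps)
        = (["A", "C"] ++ List.replicate (j + 1) "B" ++ ["bb"],
           steps ++ [PySem.Str.join " " (["A", "C"] ++ List.replicate (j + 1) "B" ++ ["bb"])]) from by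
      simp only [aStep1, hform]]
    rw [ih, show j + 1 + k = j + (k + 1) from by omega,
      List.range_succ_eq_map, List.map_cons, List.map_map]
    refine congrArg _ ?_
    rw [List.append_assoc, List.singleton_append]
    refine congrArg _ (congrArg₂ _ (by norm_num) ?_)
    refine List.map_congr_left fun i _ => ?_
    simp [Function.comp, show j + 1 + i + 1 = j + (i + 1) + 1 from by omega]
lemma stage3 (K : Nat) (steps : List String) :
    PySem.List.slice (aLoop1 K (["A", "C", "B"], steps)).1 none (some (-1)) ++ ["bb"]
        = ["A", "C"] ++ List.replicate K "B" ++ ["bb"]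
    ∧ (aLoop1 K (["A", "C", "B"], steps)).2
        = steps ++ (List.range K).map
            (fun i => PySem.Str.join " " (["A", "C"] ++ List.replicate (i + 1) "B" ++ ["bb"])) := by
  cases K with
  | zero => simp [aLoop1, PySem.List.slice_to_neg_one]
  | succ k =>
    have hstep : aStep1 (["A", "C", "B"], steps)
        = (["A", "C"] ++ List.replicate 1 "B" ++ ["bb"],
           steps ++ [PySem.Str.join " " (["A", "C"] ++ List.replicate 1 "B" ++ ["bb"])]) := by
      simp [aStep1, PySem.List.slice_to_neg_one]
    show _ ∧ (aLoop1 k (aStep1 _)).2 = _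
    rw [show (aLoop1 (k+1) (["A","C","B"], steps)) = aLoop1 k (aStep1 (["A","C","B"], steps)) from rfl,
      hstep, aLoop1_inv]
    constructor
    · rw [PySem.List.slice_to_neg_one, List.dropLast_concat, show (1 : Nat) + k = k + 1 from by omega]
    · dsimp only
      rw [List.range_succ_eq_map, List.map_cons, List.map_map, List.append_assoc, List.singleton_append]
      refine congrArg _ (congrArg₂ _ (by norm_num) ?_)
      refine List.map_congr_left fun i _ => ?_
      simp [Function.comp, show 1 + i + 1 = i + 1 + 1 from by omega]

lemma filterA_nil (l : List String) (hA : "A" ∉ l) : ∀ (s : Int),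
    (PySem.List.enumerate l s).filterMap (fun p => if p.2 = "A" then some p.1 else none) = [] := by
  induction l with
  | nil => intro s; simp [PySem.List.enumerate_nil]
  | cons x xs ih =>
    intro s
    simp only [List.mem_cons, not_or] at hA
    rw [PySem.List.enumerate_cons]
    simp [Ne.symm hA.1, ih hA.2]

lemma rightA_eq (p : Nat) (tl : List String) (hA : "A" ∉ tl) :
    aRightA (List.replicate p "aa" ++ "A" :: tl) = (p : Int) := by
  unfold aRightA
  rw [PySem.List.enumerate_append, List.filterMap_append,
    filterA_nil _ (by simp) , PySem.List.enumerate_cons, List.nil_append]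
  simp [filterA_nil tl hA]
lemma idx_replicate_cons (a b : String) (hab : a ≠ b) (p : Nat) (tl : List String) :
    PySem.List.index? (List.replicate p a ++ b :: tl) b = some p := by
  induction p with
  | zero => simpa using PySem.List.index?_cons_self b tl
  | succ p ih =>
    rw [List.replicate_succ, List.cons_append, PySem.List.index?_cons_of_ne _ hab, ih]
    rfl

lemma take_rep (p : Nat) (tl : List String) :
    (List.replicate p "aa" ++ "A" :: tl).take p = List.replicate p "aa" := by
  induction p with
  | zero => simp
  | succ p ih => simp [List.replicate_succ, ih]

lemma drop_rep (p : Nat) (tl : List String) :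
    (List.replicate p "aa" ++ "A" :: tl).drop (p + 1) = tl := by
  induction p with
  | zero => simp
  | succ p ih => simpa [List.replicate_succ] using ih

lemma aLoop2_inv (q : Nat) (tl : List String) (hA : "A" ∉ tl) : ∀ (p : Nat) (steps : List String),
    aLoop2 q (List.replicate p "aa" ++ "A" :: tl, steps)
      = (List.replicate (p + q) "aa" ++ "A" :: tl,
         steps ++ (List.range q).map
           (fun i => PySem.Str.join " " (List.replicate (p + i + 1) "aa" ++ "A" :: tl))) := by
  induction q with
  | zero => intro p steps; simp [aLoop2]
  | succ q ih =>
    intro p steps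
    have hcur : PySem.List.slice (List.replicate p "aa" ++ "A" :: tl) none (some (aRightA (List.replicate p "aa" ++ "A" :: tl)))
          ++ ["aa", "A"] ++ PySem.List.slice (List.replicate p "aa" ++ "A" :: tl) (some (aRightA (List.replicate p "aa" ++ "A" :: tl) + 1)) none
        = List.replicate (p + 1) "aa" ++ "A" :: tl := by
      rw [rightA_eq p tl hA, PySem.List.slice_to _ (by omega),
        PySem.List.slice_from _ (by omega), Int.toNat_natCast,
        show ((p : Int) + 1).toNat = p + 1 from by omega, take_rep, drop_rep]
      simp [List.replicate_succ']
    show aLoop2 q (aStep2 _) = _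
    rw [show aStep2 (List.replicate p "aa" ++ "A" :: tl, steps)
        = (List.replicate (p + 1) "aa" ++ "A" :: tl,
           steps ++ [PySem.Str.join " " (List.replicate (p + 1) "aa" ++ "A" :: tl)]) from by
      simp only [aStep2, hcur]]
    rw [ih, show p + 1 + q = p + (q + 1) from by omega,
      List.range_succ_eq_map, List.map_cons, List.map_map]
    refine congrArg _ ?_
    dsimp only
    rw [List.append_assoc, List.singleton_append]
    refine congrArg _ (congrArg₂ _ (by norm_num) ?_)
    refine List.map_congr_left fun i _ => ?_
    simp [Function.comp, show p + 1 + i + 1 = p + (i + 1) + 1 from by omega]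
lemma alt_normal (n m : Int) : rightmost_derivation_alt n m =
    ["S", "A C B"]
    ++ (List.range (m - 1).toNat).map
        (fun i => PySem.Str.join " " (["A", "C"] ++ List.replicate (i + 1) "B" ++ ["bb"]))
    ++ [PySem.Str.join " " (["A", "C"] ++ List.replicate (m - 1).toNat "B" ++ ["bb"])]
    ++ [PySem.Str.join " " (["A", "cc"] ++ List.replicate (m - 1).toNat "B" ++ ["bb"])]
    ++ (List.range (n - 1).toNat).map
        (fun i => PySem.Str.join " " (List.replicate (i + 1) "aa" ++ ["A", "cc"] ++ List.replicate (m - 1).toNat "B" ++ ["bb"]))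
    ++ [PySem.Str.join " " (List.replicate ((n - 1).toNat + 1) "aa" ++ ["cc"] ++ List.replicate (m - 1).toNat "B" ++ ["bb"])] := by
  have h1 : (max (m - 1) 0).toNat = (m - 1).toNat := by omega
  have h2 : (max n 1).toNat = (n - 1).toNat + 1 := by omega
  simp only [rightmost_derivation_alt, PySem.List.pyRange_one, List.map_map, h1, h2]
  have e1 : List.map ((fun k : Int => PySem.Str.join " " (["A", "C"] ++ List.replicate k.toNat "B" ++ ["bb"])) ∘ fun k : Nat => 1 + (k : Int)) (List.range (m - 1).toNat)
      = List.map (fun i => PySem.Str.join " " (["A", "C"] ++ List.replicate (i + 1) "B" ++ ["bb"])) (List.range (m - 1).toNat) :=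
    List.map_congr_left fun i _ => by
      simp [Function.comp, show ((1 : Int) + (i : Nat)).toNat = i + 1 from by omega]
  have e2 : List.map ((fun k : Int => PySem.Str.join " " (List.replicate k.toNat "aa" ++ ["A", "cc"] ++ (List.replicate (m - 1).toNat "B" ++ ["bb"]))) ∘ fun k : Nat => 1 + (k : Int)) (List.range (n - 1).toNat)
      = List.map (fun i => PySem.Str.join " " (List.replicate (i + 1) "aa" ++ ["A", "cc"] ++ List.replicate (m - 1).toNat "B" ++ ["bb"])) (List.range (n - 1).toNat) :=
    List.map_congr_left fun i _ => by
      simp [Function.comp, show ((1 : Int) + (i : Nat)).toNat = i + 1 from by omega, List.append_assoc]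
  rw [e1, e2]
  simp [List.append_assoc]
lemma a_eq_alt (n m : Int) :
    rightmost_derivation n m = rightmost_derivation_alt n m := by
  rw [alt_normal]
  simp only [rightmost_derivation]
  obtain ⟨h1, h2⟩ := stage3 (m - 1).toNat
    ([PySem.Str.join " " ["S"]] ++ [PySem.Str.join " " ["A", "C", "B"]])
  rw [h1, h2]
  have hidx : PySem.List.index? (["A", "C"] ++ List.replicate (m - 1).toNat "B" ++ ["bb"]) "C" = some 1 := by
    rw [show (["A", "C"] ++ List.replicate (m - 1).toNat "B" ++ ["bb"] : List String)
        = "A" :: "C" :: (List.replicate (m - 1).toNat "B" ++ ["bb"]) from by simp,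
      PySem.List.index?_cons_of_ne _ (by decide), PySem.List.index?_cons_self]
    rfl
  rw [hidx]
  simp only [Option.getD_some, Nat.cast_one]
  rw [PySem.List.slice_to _ (by omega), PySem.List.slice_from _ (by omega)]
  have hcur4 : (List.take ((1:Int).toNat) (["A", "C"] ++ List.replicate (m - 1).toNat "B" ++ ["bb"])
        ++ ["cc"] ++ List.drop (((1:Int) + 1).toNat) (["A", "C"] ++ List.replicate (m - 1).toNat "B" ++ ["bb"]) : List String)
      = List.replicate 0 "aa" ++ "A" :: ("cc" :: (List.replicate (m - 1).toNat "B" ++ ["bb"])) := by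
    simp
  rw [hcur4]
  have hA : "A" ∉ ("cc" :: (List.replicate (m - 1).toNat "B" ++ ["bb"]) : List String) := by
    simp [List.mem_replicate]
  rw [aLoop2_inv (n - 1).toNat _ hA 0]
  simp only [Nat.zero_add]
  rw [idx_replicate_cons "aa" "A" (by decide)]
  simp only [Option.getD_some]
  rw [PySem.List.slice_to _ (by omega), PySem.List.slice_from _ (by omega),
    Int.toNat_natCast, show (((n - 1).toNat : Int) + 1).toNat = (n - 1).toNat + 1 from by omega,
    take_rep, drop_rep]
  simp [List.append_assoc, List.replicate_succ']
  exact ⟨by decide, by decide⟩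

-- ===== VERDICT (by name: the statement is the Claim_ definition above) =====
theorem rightmost_derivation_spec : Claim_equal_rightmost_derivation := by
  intro n m _
  exact a_eq_alt n m
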